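-- pv_equiv track=rewrite | github.com/green-fox-academy/bejczib | week-4/day-2/encoded_zen_lines.py | alma
-- ===== SOURCE A (Python) =====
-- def alma(text):
--     new = ''
--     for i in text:
--         if i == ' ':
--             new += i
--         elif i == '\n':
--             new += i
--         else:
--             new += chr(ord(i)-1)
--     return new
-- ===== SOURCE B (Python) =====
-- def alma(text):
--     table = {ord(c): ord(c) - 1 for c in text if c != ' ' and c != '\n'}
--     return text.translate(table)
-- ===== Notes on version B (the rewrite author's own statement) =====
-- stated objective: idiomatic
-- what changed: Replaces the per-character branch-and-concatenate loop with building an ord->ord-1 translation table (space and newline unmapped) and a single str.translate call.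
import Mathlib
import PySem

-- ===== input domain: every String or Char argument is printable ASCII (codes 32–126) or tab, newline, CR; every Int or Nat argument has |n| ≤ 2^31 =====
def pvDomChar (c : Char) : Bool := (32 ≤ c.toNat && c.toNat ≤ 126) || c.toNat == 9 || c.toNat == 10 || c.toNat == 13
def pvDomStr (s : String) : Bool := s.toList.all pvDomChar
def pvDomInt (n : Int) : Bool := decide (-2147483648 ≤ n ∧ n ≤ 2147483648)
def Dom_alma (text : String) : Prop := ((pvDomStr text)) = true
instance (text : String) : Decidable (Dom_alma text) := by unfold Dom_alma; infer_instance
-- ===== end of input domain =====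

-- B replaces A's per-char branch-and-concatenate loop by a translation table (dict ord c -> ord c - 1,
-- space/newline unmapped) applied in one pass; objective: idiomatic (str.translate).
-- chr(ord i - 1) is ported as Char.ofNat (i.toNat - 1), exact on Dom (all codes ≥ 9, so no chr(-1)).

-- ===== PORT A =====
def alma (text : String) : String :=
  String.ofList (text.toList.foldl (fun new i =>
    if i = ' ' then new ++ [i]
    else if i = '\n' then new ++ [i]
    else new ++ [Char.ofNat (i.toNat - 1)]) [])

-- ===== PORT B =====
-- the dict comprehension {ord(c): ord(c)-1 for c in text if c != ' ' and c != '\n'}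
def almaTable (text : String) : PySem.Dict Nat Nat :=
  text.toList.foldl (fun d c =>
    if c ≠ ' ' ∧ c ≠ '\n' then d.insert c.toNat (c.toNat - 1) else d) PySem.Dict.empty

-- text.translate(table): mapped ordinals are replaced, unmapped characters pass through
def alma_alt (text : String) : String :=
  String.ofList (text.toList.map (fun c =>
    match (almaTable text).get? c.toNat with
    | some n => Char.ofNat n
    | none => c))

-- ===== PRECONDITION & SPEC =====
def Spec_alma (text : String) (out : String) : Prop := out = alma_alt text
instance (text : String) (out : String) : Decidable (Spec_alma text out) := by unfold Spec_alma; infer_instance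

-- ===== CLAIM (what is proved, stated in full; the proofs are below) =====
def Claim_equal_alma : Prop := ∀ (text : String), Dom_alma text → Spec_alma text (alma text)

-- ===== LEMMAS AND PROOFS =====

-- A's per-character result
def almaChar (c : Char) : Char :=
  if c = ' ' then c else if c = '\n' then c else Char.ofNat (c.toNat - 1)

theorem char_toNat_inj {c c' : Char} (h : c.toNat = c'.toNat) : c = c' := by
  have := congrArg Char.ofNat h
  simpa [Char.ofNat_toNat] using this

theorem alma_foldl (l : List Char) (acc : List Char) :
    l.foldl (fun new i =>
      if i = ' ' then new ++ [i]
      else if i = '\n' then new ++ [i]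
      else new ++ [Char.ofNat (i.toNat - 1)]) acc = acc ++ l.map almaChar := by
  induction l generalizing acc with
  | nil => simp
  | cons c l ih =>
    simp only [List.foldl_cons, List.map_cons, ih, almaChar]
    split_ifs <;> simp

theorem table_get (l : List Char) (d : PySem.Dict Nat Nat) (n : Nat) :
    (l.foldl (fun d c =>
      if c ≠ ' ' ∧ c ≠ '\n' then d.insert c.toNat (c.toNat - 1) else d) d).get? n =
    if ∃ c ∈ l, c.toNat = n ∧ c ≠ ' ' ∧ c ≠ '\n' then some (n - 1) else d.get? n := by
  induction l generalizing d with
  | nil => simp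
  | cons c l ih =>
    rw [List.foldl_cons, ih]
    by_cases hl : ∃ c' ∈ l, c'.toNat = n ∧ c' ≠ ' ' ∧ c' ≠ '\n'
    · obtain ⟨c', h1, h2⟩ := hl
      rw [if_pos ⟨c', h1, h2⟩, if_pos ⟨c', List.mem_cons_of_mem _ h1, h2⟩]
    · rw [if_neg hl]
      by_cases hc : c.toNat = n ∧ c ≠ ' ' ∧ c ≠ '\n'
      · have hex : ∃ c' ∈ c :: l, c'.toNat = n ∧ c' ≠ ' ' ∧ c' ≠ '\n' :=
          ⟨c, by simp, hc⟩
        rw [if_pos hex, if_pos hc.2, ← hc.1, PySem.Dict.get?_insert_self]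
      · have hnex : ¬ ∃ c' ∈ c :: l, c'.toNat = n ∧ c' ≠ ' ' ∧ c' ≠ '\n' := by
          rintro ⟨c', hmem, h⟩
          rcases List.mem_cons.mp hmem with rfl | hmem'
          · exact hc h
          · exact hl ⟨c', hmem', h⟩
        rw [if_neg hnex]
        by_cases hcc : c ≠ ' ' ∧ c ≠ '\n'
        · rw [if_pos hcc, PySem.Dict.get?_insert, if_neg (fun he : n = c.toNat => hc ⟨he.symm, hcc⟩)]
        · rw [if_neg hcc]

theorem translate_char (text : String) (c : Char) (hc : c ∈ text.toList) :
    (match (almaTable text).get? c.toNat with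
      | some n => Char.ofNat n
      | none => c) = almaChar c := by
  unfold almaTable
  rw [table_get]
  by_cases h : c ≠ ' ' ∧ c ≠ '\n'
  · rw [if_pos ⟨c, hc, rfl, h.1, h.2⟩]
    simp [almaChar, h.1, h.2]
  · rw [if_neg (by
      rintro ⟨c', _, he, h1, h2⟩
      exact h (by rw [char_toNat_inj he.symm]; exact ⟨h1, h2⟩)),
      PySem.Dict.get?_empty]
    by_cases hsp : c = ' '
    · simp [almaChar, hsp]
    · have hn : c = '\n' := by tauto
      simp [almaChar, hn]

-- ===== VERDICT (by name: the statement is the Claim_ definition above) =====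
theorem alma_spec : Claim_equal_alma := by
  intro text _
  unfold Spec_alma alma alma_alt
  rw [alma_foldl]
  congr 1
  simp only [List.nil_append]
  exact (List.map_congr_left (fun c hc => (translate_char text c hc))).symm
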